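-- pv_equiv track=rewrite | github.com/PrachiSinghal86/HackerRank | Lisa's Workbook.py | workbook
-- ===== SOURCE A (Python) =====
-- def workbook(n, k, arr):
--     pr = 0
--     p = 1
--     s = 0
--
--     for i in range(n):
--         if arr[i] % k == 0:
--             no = int(arr[i] / k)
--         else:
--             no = arr[i] // k
--             no = no + 1
--
--         for j in range(0, no):
--             if p >= j * k + 1 and p <= (j + 1) * (k):
--
--                 if p <= arr[i]:
--                     s = s + 1
--
--             p = p + 1
--     return s
-- ===== SOURCE B (Python) =====
-- def workbook(n, k, arr):
--     # Per-chapter closed form: count the special problems of each chapter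
--     # arithmetically (one step per chapter) instead of iterating over its pages.
--     s = 0
--     p0 = 1  # page number of the first page of the current chapter
--     for t in arr[:max(n, 0)]:
--         pages = max(0, -(-t // k))  # ceil(t / k), clamped at 0
--         # special j (0-based page within chapter) satisfy:
--         #   j*(k-1) >= p0 - k,  j*(k-1) <= p0 - 1,  j <= t - p0,  0 <= j < pages
--         if k == 1:
--             cnt = max(0, min(pages - 1, t - p0) + 1) if p0 == 1 else 0
--         else:
--             lo = max(0, -(-(p0 - k) // (k - 1)))
--             hi = min(pages - 1, min((p0 - 1) // (k - 1), t - p0))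
--             cnt = max(0, hi - lo + 1)
--         s += cnt
--         p0 += pages
--     return s
-- ===== Notes on version B (the rewrite author's own statement) =====
-- stated objective: alternative
-- what changed: A walks every page of every chapter (inner loop of ceil(arr[i]/k) iterations); B computes each chapter's special-page count with a closed-form solution of the defining inequalities (integer division, min/max), one arithmetic step per chapter.
import Mathlib
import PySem

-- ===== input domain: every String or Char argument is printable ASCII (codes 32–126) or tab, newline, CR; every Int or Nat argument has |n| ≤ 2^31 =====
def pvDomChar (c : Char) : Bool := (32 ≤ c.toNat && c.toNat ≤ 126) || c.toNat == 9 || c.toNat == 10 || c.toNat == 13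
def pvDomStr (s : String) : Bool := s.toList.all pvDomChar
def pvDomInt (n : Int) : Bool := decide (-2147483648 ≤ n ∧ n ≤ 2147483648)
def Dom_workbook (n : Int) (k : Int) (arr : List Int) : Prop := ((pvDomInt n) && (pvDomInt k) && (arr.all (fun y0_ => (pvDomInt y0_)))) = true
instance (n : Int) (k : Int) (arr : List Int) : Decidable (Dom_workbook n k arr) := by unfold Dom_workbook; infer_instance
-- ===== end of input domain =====

-- B replaces A's page-by-page scan with a per-chapter closed form: it counts the
-- special pages of each chapter by solving the defining inequalities arithmetically.

-- ===== PORT A =====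
-- inner-loop body of A: state is (p, s), j is the page index inside the chapter
def wbStepA (k a : Int) (ps : Int × Int) (j : Int) : Int × Int :=
  (ps.1 + 1,
   if ps.1 ≥ j * k + 1 ∧ ps.1 ≤ (j + 1) * k then
     (if ps.1 ≤ a then ps.2 + 1 else ps.2)
   else ps.2)

-- outer-loop body of A for one chapter with arr[i] = a
-- int(arr[i]/k) is ported as truncdiv (exact: |values| ≤ 2^31 < 2^53)
def wbChapA (k : Int) (ps : Int × Int) (a : Int) : Int × Int :=
  let no := if PySem.Int.mod a k = 0 then PySem.Int.truncdiv a k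
            else PySem.Int.floordiv a k + 1
  (PySem.List.pyRange 0 no 1).foldl (wbStepA k a) ps

def workbook (n : Int) (k : Int) (arr : List Int) : Int :=
  ((PySem.List.pyRange 0 n 1).foldl
    (fun ps i => wbChapA k ps (PySem.List.pyGetD arr i 0)) ((1 : Int), (0 : Int))).2

-- ===== PORT B =====
-- per-chapter closed form of B: state is (s, p0); p0 = first page of the chapter
def wbChapB (k : Int) (sp : Int × Int) (t : Int) : Int × Int :=
  let p0 := sp.2
  let pages := max 0 (-(PySem.Int.floordiv (-t) k))
  let cnt :=
    if k = 1 then (if p0 = 1 then max 0 (min (pages - 1) (t - p0) + 1) else 0)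
    else
      max 0 (min (pages - 1) (min (PySem.Int.floordiv (p0 - 1) (k - 1)) (t - p0)) -
             max 0 (-(PySem.Int.floordiv (-(p0 - k)) (k - 1))) + 1)
  (sp.1 + cnt, p0 + pages)

def workbook_alt (n : Int) (k : Int) (arr : List Int) : Int :=
  ((PySem.List.slice arr none (some (max n 0))).foldl (wbChapB k) ((0 : Int), (1 : Int))).1

-- ===== PRECONDITION & SPEC =====
-- Pre_ is exactly where the Python A returns: k = 0 raises ZeroDivisionError and
-- n > len(arr) raises IndexError, in both cases only once the loop body runs (n ≥ 1).
def Pre_workbook (n : Int) (k : Int) (arr : List Int) : Prop :=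
  n ≤ (arr.length : Int) ∧ (k ≠ 0 ∨ n ≤ 0)
instance (n : Int) (k : Int) (arr : List Int) : Decidable (Pre_workbook n k arr) := by
  unfold Pre_workbook; infer_instance
def pvWitness_workbook : Int × Int × List Int := (2, 3, [4, 2])

def Spec_workbook (n : Int) (k : Int) (arr : List Int) (out : Int) : Prop := out = workbook_alt n k arr
instance (n : Int) (k : Int) (arr : List Int) (out : Int) : Decidable (Spec_workbook n k arr out) := by
  unfold Spec_workbook; infer_instance

-- ===== CLAIM (what is proved, stated in full; the proofs are below) =====
def Claim_equal_workbook : Prop := ∀ (n : Int) (k : Int) (arr : List Int), Dom_workbook n k arr → Pre_workbook n k arr → Spec_workbook n k arr (workbook n k arr)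

-- ===== LEMMAS AND PROOFS =====

lemma wb_fdiv_nonneg (a k : Int) (ha : a ≤ 0) (hk : k < 0) : 0 ≤ PySem.Int.floordiv a k := by
  have e := PySem.Int.floordiv_mul_add_mod a k
  have hb := PySem.Int.mod_neg_bounds a hk
  by_contra h
  push Not at h
  have hq : PySem.Int.floordiv a k ≤ -1 := by omega
  have : PySem.Int.floordiv a k * k ≥ (-1) * k :=
    mul_le_mul_of_nonpos_right hq (le_of_lt hk)
  omega

lemma wb_no_eq_ceil (t k : Int) (hk : k ≠ 0) :
    (if PySem.Int.mod t k = 0 then PySem.Int.truncdiv t k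
     else PySem.Int.floordiv t k + 1) = -(PySem.Int.floordiv (-t) k) := by
  have e1 := PySem.Int.floordiv_mul_add_mod t k
  have e2 := PySem.Int.floordiv_mul_add_mod (-t) k
  by_cases hr : PySem.Int.mod t k = 0
  · -- divisible case
    obtain ⟨c, hc⟩ := (PySem.Int.mod_eq_zero_iff_dvd t k).1 hr
    have hr' : PySem.Int.mod (-t) k = 0 :=
      (PySem.Int.mod_eq_zero_iff_dvd (-t) k).2 (Dvd.dvd.neg_right ⟨c, hc⟩)
    have hck : t = c * k := by rw [hc]; ring
    have hq : PySem.Int.floordiv t k = c :=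
      mul_right_cancel₀ hk (by have : c * k = t := hck.symm; omega)
    have hq' : PySem.Int.floordiv (-t) k = -c :=
      mul_right_cancel₀ hk (by have : -c * k = -t := by rw [hck]; ring
                               omega)
    have htd : PySem.Int.truncdiv t k = c := by
      unfold PySem.Int.truncdiv
      rw [hck]
      exact Int.mul_tdiv_cancel c hk
    rw [if_pos hr, htd, hq']
    ring
  · rw [if_neg hr]
    have hr' : PySem.Int.mod (-t) k ≠ 0 := by
      intro h
      exact hr ((PySem.Int.mod_eq_zero_iff_dvd t k).2
        (Int.dvd_neg.1 ((PySem.Int.mod_eq_zero_iff_dvd (-t) k).1 h)))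
    set q := PySem.Int.floordiv t k with hqdef
    set q' := PySem.Int.floordiv (-t) k with hq'def
    have hd : (q + q') * k = -(PySem.Int.mod t k + PySem.Int.mod (-t) k) := by ring_nf; omega
    rcases lt_or_gt_of_ne hk with hkneg | hkpos
    · have b1 := PySem.Int.mod_neg_bounds t hkneg
      have b2 := PySem.Int.mod_neg_bounds (-t) hkneg
      have h1 : 0 < (q + q') * k := by omega
      have h2 : (q + q') * k < (-2) * k := by omega
      have hlt : q + q' < 0 := by
        by_contra h
        push Not at h
        have : (q + q') * k ≤ 0 * k := mul_le_mul_of_nonpos_right h (le_of_lt hkneg)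
        omega
      have hgt : -2 < q + q' := by
        by_contra h
        push Not at h
        have : (-2 : Int) * k ≤ (q + q') * k := mul_le_mul_of_nonpos_right h (le_of_lt hkneg)
        omega
      have : q + q' = -1 := by omega
      omega
    · have b1n := PySem.Int.mod_nonneg t hkpos
      have b1l := PySem.Int.mod_lt t hkpos
      have b2n := PySem.Int.mod_nonneg (-t) hkpos
      have b2l := PySem.Int.mod_lt (-t) hkpos
      have h1 : (q + q') * k < 0 := by omega
      have h2 : (-2) * k < (q + q') * k := by omega
      have hlt : q + q' < 0 := by
        by_contra h
        push Not at h
        have : 0 * k ≤ (q + q') * k := mul_le_mul_of_nonneg_right h (le_of_lt hkpos)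
        omega
      have hgt : -2 < q + q' := by
        by_contra h
        push Not at h
        have : (q + q') * k ≤ (-2) * k := mul_le_mul_of_nonneg_right h (le_of_lt hkpos)
        omega
      have : q + q' = -1 := by omega
      omega


lemma wb_count_range_interval (lo hi : Int) : ∀ (m : Nat),
    (((List.range m).countP (fun (j : Nat) => decide (lo ≤ (j : Int) ∧ (j : Int) ≤ hi)) : Nat) : Int)
      = max 0 (min ((m : Int) - 1) hi - max 0 lo + 1) := by
  intro m
  induction m with
  | zero => simp
  | succ m ih =>
    rw [List.range_succ, List.countP_append]
    push_cast [ih]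
    simp only [List.countP_cons, List.countP_nil]
    by_cases h : lo ≤ (m : Int) ∧ (m : Int) ≤ hi
    · simp [h]; omega
    · simp [h]; omega

lemma wb_inner_closed (k a : Int) : ∀ (m : Nat) (p0 s : Int),
    (PySem.List.pyRange 0 (m : Int) 1).foldl (wbStepA k a) (p0, s)
      = (p0 + m,
         s + (((List.range m).countP
                (fun (j : Nat) => decide ((p0 + j ≥ (j : Int) * k + 1 ∧ p0 + j ≤ ((j : Int) + 1) * k) ∧ p0 + (j : Int) ≤ a)) : Nat) : Int)) := by
  intro m
  induction m with
  | zero => intro p0 s; simp [PySem.List.pyRange_one_eq_nil]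
  | succ m ih =>
    intro p0 s
    rw [show ((m + 1 : Nat) : Int) = (m : Int) + 1 by push_cast; ring,
        PySem.List.pyRange_one_succ_right (by positivity),
        List.foldl_append, ih, List.range_succ, List.countP_append]
    simp only [List.foldl_cons, List.foldl_nil, List.countP_cons, List.countP_nil, wbStepA]
    rw [Prod.mk.injEq]
    refine ⟨by ring, ?_⟩
    simp only [decide_eq_true_eq]
    split_ifs <;> first | tauto | (push_cast; omega)

lemma wb_chap_eq (k : Int) (hk : k ≠ 0) (t p0 s : Int) (hp : 1 ≤ p0) :
    wbChapA k (p0, s) t = Prod.swap (wbChapB k (s, p0) t) := by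
  unfold wbChapA wbChapB
  rw [wb_no_eq_ceil t k hk]
  simp only [Prod.swap_prod_mk]
  set c : Int := -(PySem.Int.floordiv (-t) k) with hc
  by_cases hc0 : c ≤ 0
  · -- empty chapter
    rw [PySem.List.pyRange_one_eq_nil hc0]
    simp only [List.foldl_nil, Prod.mk.injEq]
    split_ifs <;> omega
  · -- c pages
    push Not at hc0
    have hm : c = ((c.toNat : Nat) : Int) := by omega
    set m : Nat := c.toNat with hmdef
    rw [hm, wb_inner_closed]
    have hpage : max 0 c = (m : Int) := by omega
    rw [Prod.mk.injEq]
    constructor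
    · omega
    · -- count = closed-form cnt
      rcases lt_trichotomy k 1 with hk1 | hk1 | hk1
      · -- k ≤ 0, so k ≤ -1 : predicate is always false, and B's cnt is 0
        have hkneg : k ≤ -1 := by omega
        have hcount : (List.range m).countP
            (fun (j : Nat) => decide ((p0 + j ≥ (j : Int) * k + 1 ∧ p0 + j ≤ ((j : Int) + 1) * k) ∧ p0 + (j : Int) ≤ t)) = 0 := by
          apply List.countP_eq_zero.2
          intro j _
          simp only [decide_eq_true_eq, not_and]
          intro h1
          exfalso
          have hj : (0 : Int) ≤ (j : Int) := Int.natCast_nonneg j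
          have : ((j : Int) + 1) * k ≤ 1 * k :=
            mul_le_mul_of_nonpos_right (by omega) (by omega)
          omega
        rw [hcount]
        -- B: cnt = 0 since t < 0 here
        have ht : t ≤ -1 := by
          by_contra h
          have := wb_fdiv_nonneg (-t) k (by omega) (by omega)
          omega
        rw [if_neg (by omega : ¬ k = 1)]
        omega
      · -- k = 1
        subst hk1
        rw [if_pos rfl]
        by_cases hp1 : p0 = 1
        · subst hp1
          have hcong : (List.range m).countP
              (fun (j : Nat) => decide ((1 + j ≥ (j : Int) * 1 + 1 ∧ 1 + j ≤ ((j : Int) + 1) * 1) ∧ 1 + (j : Int) ≤ t))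
              = (List.range m).countP (fun (j : Nat) => decide ((0 : Int) ≤ (j : Int) ∧ (j : Int) ≤ t - 1)) := by
            apply List.countP_congr
            intro j _
            simp only [decide_eq_true_eq]
            constructor
            · rintro ⟨⟨h1, h2⟩, h3⟩; omega
            · rintro ⟨h1, h2⟩; omega
          rw [hcong, wb_count_range_interval]
          rw [if_pos rfl]
          omega
        · rw [if_neg hp1]
          have hcount : (List.range m).countP
              (fun (j : Nat) => decide ((p0 + j ≥ (j : Int) * 1 + 1 ∧ p0 + j ≤ ((j : Int) + 1) * 1) ∧ p0 + (j : Int) ≤ t)) = 0 := by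
            apply List.countP_eq_zero.2
            intro j _
            simp only [decide_eq_true_eq, not_and]
            intro h1
            exfalso
            omega
          rw [hcount]
          omega
      · -- k ≥ 2
        have hk2 : 2 ≤ k := by omega
        rw [if_neg (by omega : ¬ k = 1)]
        set lo : Int := -(PySem.Int.floordiv (-(p0 - k)) (k - 1)) with hlo
        set hi : Int := min (PySem.Int.floordiv (p0 - 1) (k - 1)) (t - p0) with hhi
        have hcong : (List.range m).countP
            (fun (j : Nat) => decide ((p0 + j ≥ (j : Int) * k + 1 ∧ p0 + j ≤ ((j : Int) + 1) * k) ∧ p0 + (j : Int) ≤ t))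
            = (List.range m).countP (fun (j : Nat) => decide (lo ≤ (j : Int) ∧ (j : Int) ≤ hi)) := by
          apply List.countP_congr
          intro j _
          simp only [decide_eq_true_eq]
          have hb1 : (j : Int) ≤ PySem.Int.floordiv (p0 - 1) (k - 1) ↔ (j : Int) * (k - 1) ≤ p0 - 1 :=
            PySem.Int.le_floordiv_iff_mul_le (by omega)
          have hb2 : -(j : Int) ≤ PySem.Int.floordiv (-(p0 - k)) (k - 1) ↔ (-(j : Int)) * (k - 1) ≤ -(p0 - k) :=
            PySem.Int.le_floordiv_iff_mul_le (by omega)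
          have hr1 : (j : Int) * (k - 1) = (j : Int) * k - (j : Int) := by ring
          have hr2 : (-(j : Int)) * (k - 1) = -((j : Int) * k) + (j : Int) := by ring
          have hr3 : ((j : Int) + 1) * k = (j : Int) * k + k := by ring
          rw [hlo, hhi]
          constructor
          · rintro ⟨⟨h1, h2⟩, h3⟩
            refine ⟨by omega, ?_⟩
            have := hb1.2 (by omega)
            omega
          · rintro ⟨h1, h2⟩
            have g1 := hb1.1 (by omega)
            have g2 := hb2.1 (by omega)
            refine ⟨⟨by omega, by omega⟩, by omega⟩
        rw [hcong, wb_count_range_interval]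
        omega

lemma wb_chapB_mono (k s p0 t : Int) : p0 ≤ (wbChapB k (s, p0) t).2 := by
  simp only [wbChapB]
  omega

lemma wb_fold_swap (k : Int) (hk : k ≠ 0) : ∀ (l : List Int) (p0 s : Int), 1 ≤ p0 →
    l.foldl (wbChapA k) (p0, s) = Prod.swap (l.foldl (wbChapB k) (s, p0)) := by
  intro l
  induction l with
  | nil => intro p0 s _; rfl
  | cons t l ih =>
    intro p0 s hp
    rw [List.foldl_cons, List.foldl_cons, wb_chap_eq k hk t p0 s hp]
    have hmono := wb_chapB_mono k s p0 t
    have : wbChapB k (s, p0) t = ((wbChapB k (s, p0) t).1, (wbChapB k (s, p0) t).2) := rfl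
    rw [this, Prod.swap_prod_mk]
    exact ih _ _ (by omega)

lemma wb_outer_eq (arr : List Int) (k : Int) : ∀ (m : Nat), m ≤ arr.length → ∀ (init : Int × Int),
    (PySem.List.pyRange 0 (m : Int) 1).foldl
        (fun ps i => wbChapA k ps (PySem.List.pyGetD arr i 0)) init
      = (arr.take m).foldl (wbChapA k) init := by
  intro m
  induction m with
  | zero => intro _ init; simp [PySem.List.pyRange_one_eq_nil]
  | succ m ih =>
    intro hlen init
    rw [show ((m + 1 : Nat) : Int) = (m : Int) + 1 by push_cast; ring,
        PySem.List.pyRange_one_succ_right (by positivity), List.foldl_append,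
        ih (by omega) init]
    have hm : m < arr.length := by omega
    rw [List.take_add_one, List.foldl_append, List.getElem?_eq_getElem hm]
    simp only [Option.toList_some, List.foldl_cons, List.foldl_nil,
      PySem.List.pyGetD_natCast]
    rw [List.getD_eq_getElem arr 0 hm]

-- ===== VERDICT (by name: the statement is the Claim_ definition above) =====
theorem workbook_spec : Claim_equal_workbook := by
  intro n k arr _ hpre
  obtain ⟨hlen, hk⟩ := hpre
  unfold Spec_workbook workbook workbook_alt
  by_cases hn : n ≤ 0
  · rw [PySem.List.pyRange_one_eq_nil hn,
        show max n 0 = ((0 : Nat) : Int) by omega,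
        PySem.List.slice_to_natCast]
    rfl
  · have hk0 : k ≠ 0 := by
      rcases hk with h | h
      · exact h
      · omega
    have hmax : max n 0 = ((n.toNat : Nat) : Int) := by omega
    rw [hmax, PySem.List.slice_to_natCast,
        show n = ((n.toNat : Nat) : Int) by omega,
        wb_outer_eq arr k n.toNat (by omega) (1, 0),
        wb_fold_swap k hk0 (arr.take n.toNat) 1 0 le_rfl]
    rfl
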